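-- pv_equiv track=rewrite | github.com/Correctiontest27/Correction_test_27.04 | part2/multiply_digit.py | multiply_digit
-- ===== SOURCE A (Python) =====
-- def multiply_digit(numb):
--     x = ''
--     y = 1
--     if numb != 0:
--         mark = True
--         if numb < 0:
--             numb = numb * -1
--             mark = False
--         t = str(numb)
--         for i in t:
--             if i != '0':
--                 x += i
--         for i in x:
--             i = int(i)
--             y *= i
--         y = str(y)
--         if mark:
--             return y
--         else:
--             return '-'+y
--     else:
--         return '0'
-- ===== SOURCE B (Python) =====
-- def multiply_digit(numb):
--     if numb == 0:
--         return '0'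
--     neg = numb < 0
--     n = abs(numb)
--     prod = 1
--     while n > 0:
--         d = n % 10
--         if d != 0:
--             prod *= d
--         n //= 10
--     return ('-' if neg else '') + str(prod)
-- ===== Notes on version B (the rewrite author's own statement) =====
-- stated objective: simpler
-- what changed: Replaces the string build (filter non-zero characters out of str(numb), then re-parse each character with int) by direct arithmetic digit extraction with modulus and floor division by ten in a single while loop.
import Mathlib
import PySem

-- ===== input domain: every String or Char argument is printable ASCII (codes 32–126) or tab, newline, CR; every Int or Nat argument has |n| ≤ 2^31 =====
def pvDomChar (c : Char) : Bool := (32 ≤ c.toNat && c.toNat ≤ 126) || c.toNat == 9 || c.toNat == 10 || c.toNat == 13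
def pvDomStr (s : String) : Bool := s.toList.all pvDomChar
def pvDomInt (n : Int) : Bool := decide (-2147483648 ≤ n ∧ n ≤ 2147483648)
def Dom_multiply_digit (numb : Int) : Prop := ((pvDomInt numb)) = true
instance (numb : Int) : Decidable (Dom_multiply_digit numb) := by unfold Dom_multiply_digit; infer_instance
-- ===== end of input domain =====

-- B replaces A's string-filtering digit extraction by arithmetic n % 10 / n // 10 peeling (simpler, same cost).


-- ===== PORT A =====
-- str(numb) → PySem.Int.toChars; int(i) on a one-char string → (PySem.Int.ofChars? [c]).getD 0
-- (the default never fires: every character of str(numb) for numb > 0 is a decimal digit).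
def multiply_digit (numb : Int) : String :=
  if numb ≠ 0 then
    let p : Int × Bool := if numb < 0 then (numb * -1, false) else (numb, true)
    let t : List Char := PySem.Int.toChars p.1
    let x : List Char := t.foldl (fun x i => if i ≠ '0' then x ++ [i] else x) []
    let y : Int := x.foldl (fun y i => y * (PySem.Int.ofChars? [i]).getD 0) 1
    if p.2 then PySem.Int.toStr y else String.ofList ('-' :: PySem.Int.toChars y)
  else "0"

-- ===== PORT B =====
-- the while loop of Source B: peel digits off n, multiplying prod by each nonzero one
def pvLoopB (n : Nat) (prod : Int) : Int :=
  if h : n = 0 then prod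
  else pvLoopB (n / 10) (if n % 10 ≠ 0 then prod * ((n % 10 : Nat) : Int) else prod)
  decreasing_by exact Nat.div_lt_self (Nat.pos_of_ne_zero h) (by omega)

def multiply_digit_alt (numb : Int) : String :=
  if numb = 0 then "0"
  else
    let neg := numb < 0
    let prod := pvLoopB numb.natAbs 1
    String.ofList ((if neg then ['-'] else []) ++ PySem.Int.toChars prod)

-- ===== PRECONDITION & SPEC =====
def Spec_multiply_digit (numb : Int) (out : String) : Prop := out = multiply_digit_alt numb
instance (numb : Int) (out : String) : Decidable (Spec_multiply_digit numb out) := by unfold Spec_multiply_digit; infer_instance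

-- ===== CLAIM (what is proved, stated in full; the proofs are below) =====
def Claim_equal_multiply_digit : Prop := ∀ (numb : Int), Dom_multiply_digit numb → Spec_multiply_digit numb (multiply_digit numb)

-- ===== LEMMAS AND PROOFS =====

-- the digit string of n, most significant first (the value of Nat.toDigits 10 n)
def pvDig (n : Nat) : List Char :=
  if h : n < 10 then [Nat.digitChar n]
  else pvDig (n / 10) ++ [Nat.digitChar (n % 10)]
  decreasing_by exact Nat.div_lt_self (by omega) (by omega)

-- product of the nonzero decimal digits of n (1 for n = 0)
def pvP (n : Nat) : Int :=
  if h : n = 0 then 1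
  else (if n % 10 ≠ 0 then ((n % 10 : Nat) : Int) else 1) * pvP (n / 10)
  decreasing_by exact Nat.div_lt_self (Nat.pos_of_ne_zero h) (by omega)

lemma pvToDigitsCore_eq (n : Nat) : ∀ (f : Nat) (acc : List Char), n < f →
    Nat.toDigitsCore 10 f n acc = pvDig n ++ acc := by
  induction n using Nat.strong_induction_on with
  | _ n ih =>
    intro f acc hf
    cases f with
    | zero => omega
    | succ f =>
      rw [Nat.toDigitsCore]
      by_cases h10 : n < 10
      · have : n / 10 = 0 := Nat.div_eq_of_lt h10
        rw [pvDig]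
        simp [this, h10, Nat.mod_eq_of_lt h10]
      · have hne : ¬ (n / 10 = 0) := by
          intro h; exact h10 (by omega)
        rw [if_neg hne]
        have hlt : n / 10 < n := Nat.div_lt_self (by omega) (by omega)
        rw [ih (n / 10) hlt f _ (by omega)]
        conv_rhs => rw [pvDig]
        simp [h10]

lemma pvToDigits_eq (n : Nat) : Nat.toDigits 10 n = pvDig n := by
  have := pvToDigitsCore_eq n (n + 1) [] (by omega)
  simpa [Nat.toDigits] using this

lemma pvOfChars_digitChar (d : Nat) (h : d < 10) :
    (PySem.Int.ofChars? [Nat.digitChar d]).getD 0 = (d : Int) := by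
  interval_cases d <;> decide

lemma pvDigitChar_eq_zero (d : Nat) (h : d < 10) : (Nat.digitChar d = '0') ↔ d = 0 := by
  interval_cases d <;> decide

-- B's loop is acc * (product of nonzero digits)
lemma pvLoopB_eq (n : Nat) : ∀ acc : Int, pvLoopB n acc = acc * pvP n := by
  induction n using Nat.strong_induction_on with
  | _ n ih =>
    intro acc
    rw [pvLoopB, pvP]
    by_cases h : n = 0
    · simp [h]
    · have hlt : n / 10 < n := Nat.div_lt_self (Nat.pos_of_ne_zero h) (by omega)
      rw [dif_neg h, dif_neg h, ih (n / 10) hlt]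
      by_cases hm : n % 10 = 0 <;> simp [hm] <;> ring

-- A's fold over the filtered digit characters is acc * (product of nonzero digits)
lemma pvFold_eq (n : Nat) : ∀ acc : Int,
    ((pvDig n).filter (fun c => decide (c ≠ '0'))).foldl
      (fun y i => y * (PySem.Int.ofChars? [i]).getD 0) acc = acc * pvP n := by
  induction n using Nat.strong_induction_on with
  | _ n ih =>
    intro acc
    rw [pvDig, pvP]
    by_cases h10 : n < 10
    · rw [dif_pos h10]
      by_cases h0 : n = 0
      · subst h0
        simp [show Nat.digitChar 0 = '0' from rfl]
      · have hz : ¬ (Nat.digitChar n = '0') := by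
          rw [pvDigitChar_eq_zero n h10]; exact h0
        have hm : n % 10 = n := Nat.mod_eq_of_lt h10
        have hd : n / 10 = 0 := Nat.div_eq_of_lt h10
        have hP0 : pvP 0 = 1 := by rw [pvP]; simp
        rw [dif_neg h0, hm, hd, hP0, mul_one, if_pos h0]
        have hfilter : List.filter (fun c => decide (c ≠ '0')) [Nat.digitChar n]
            = [Nat.digitChar n] := by simp [hz]
        rw [hfilter]
        simp only [List.foldl, pvOfChars_digitChar n h10]
    · have h0 : ¬ (n = 0) := by omega
      have hlt : n / 10 < n := Nat.div_lt_self (by omega) (by omega)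
      have hmlt : n % 10 < 10 := Nat.mod_lt _ (by omega)
      rw [dif_neg h10, dif_neg h0, List.filter_append, List.foldl_append, ih (n / 10) hlt acc]
      by_cases hm : n % 10 = 0
      · have hzc : Nat.digitChar (n % 10) = '0' := by rw [hm]; rfl
        simp [hzc, hm, show Nat.digitChar 0 = '0' from rfl]
      · have hz : ¬ (Nat.digitChar (n % 10) = '0') := by
          rw [pvDigitChar_eq_zero _ hmlt]; exact hm
        simp only [List.filter, hz, decide_not]
        simp [hz, List.foldl, pvOfChars_digitChar _ hmlt, hm]
        ring

lemma pvToChars_pos (n : Int) (h : 0 < n) : PySem.Int.toChars n = pvDig n.toNat := by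
  rw [PySem.Int.toChars]
  rw [if_neg (by omega), pvToDigits_eq]

-- A's whole digit pipeline (for a positive argument) equals B's loop value
lemma pvPipeline_eq (m : Int) (h : 0 < m) :
    ((PySem.Int.toChars m).foldl (fun x i => if i ≠ '0' then x ++ [i] else x)
        []).foldl (fun y i => y * (PySem.Int.ofChars? [i]).getD 0) 1
      = pvLoopB m.natAbs 1 := by
  rw [pvToChars_pos m h, PySem.List.foldl_append_ite_eq_filter, List.nil_append,
    pvFold_eq, pvLoopB_eq, show m.toNat = m.natAbs by omega]

theorem multiply_digit_spec : Claim_equal_multiply_digit := by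
  intro numb _
  unfold Spec_multiply_digit multiply_digit multiply_digit_alt
  by_cases h0 : numb = 0
  · simp [h0]
  · rw [if_pos h0, if_neg h0]
    by_cases hneg : numb < 0
    · rw [if_pos hneg]
      simp only
      rw [pvPipeline_eq (numb * -1) (by omega)]
      have : (numb * -1).natAbs = numb.natAbs := by omega
      rw [this]
      simp [hneg]
    · rw [if_neg hneg]
      simp only
      rw [pvPipeline_eq numb (by omega)]
      simp [hneg, PySem.Int.toStr]
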